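-- pv_equiv track=rewrite | github.com/Ashgon/piMRF | utils/Nufft_multi.py | get_batch_index
-- ===== SOURCE A (Python) =====
-- def get_batch_index(LEN, batch_size):
--     batch_size = int(batch_size)
--     num = int(LEN // batch_size)
--     yu = int(LEN % batch_size)
--     out = []
--     if LEN == 0:
--         return out
--     elif LEN <= batch_size:
--         out.append([0, LEN])
--         return out
--     for i in range(num):
--         out.append([i*batch_size, (i+1)*batch_size])
--     if yu != 0:
--         out.append([num*batch_size, LEN])
--     return out
-- ===== SOURCE B (Python) =====
-- def get_batch_index(LEN, batch_size):
--     batch_size = int(batch_size)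
--     if batch_size <= 0:
--         raise ValueError("batch_size must be a positive integer")
--     out = []
--     start = 0
--     remaining = LEN
--     while remaining != 0:
--         if remaining <= batch_size:
--             out.append([start, start + remaining])
--             break
--         out.append([start, start + batch_size])
--         start += batch_size
--         remaining -= batch_size
--     return out
-- ===== Notes on version B (the rewrite author's own statement) =====
-- stated objective: alternative
-- what changed: A counts batches with floor division and modulo (num = LEN//bs, yu = LEN%bs), special-cases empty/small LEN, loops over batch indices with multiplications and patches the remainder on at the end; B uses no division at all: it validates batch_size > 0 and peels batches off with a subtracting while-loop over (start, remaining), the final partial batch falling out of the remaining <= batch_size test.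
-- outside the precondition, e.g. on get_batch_index(5, -3): A returns [[6, 5]], B raises ValueError; on get_batch_index(6, -3): A returns [], B raises ValueError
import Mathlib
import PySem

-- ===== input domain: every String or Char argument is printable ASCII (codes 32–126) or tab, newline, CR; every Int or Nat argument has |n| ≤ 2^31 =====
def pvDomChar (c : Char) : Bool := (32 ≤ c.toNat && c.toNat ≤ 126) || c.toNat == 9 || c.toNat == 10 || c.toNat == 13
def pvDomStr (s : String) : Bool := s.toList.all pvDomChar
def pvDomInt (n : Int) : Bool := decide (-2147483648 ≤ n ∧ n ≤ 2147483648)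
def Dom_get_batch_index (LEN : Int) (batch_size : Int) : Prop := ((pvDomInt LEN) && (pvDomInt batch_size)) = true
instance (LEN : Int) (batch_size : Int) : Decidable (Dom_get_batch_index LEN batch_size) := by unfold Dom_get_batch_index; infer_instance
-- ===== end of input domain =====

-- B replaces A's floor-division counting (num = LEN//bs, remainder patch-up, index loop) by a
-- division-free subtracting while-loop peeling one batch at a time; objective: alternative (no speed claim).

-- ===== PORT A =====
def get_batch_index (LEN : Int) (batch_size : Int) : List (List Int) :=
  -- batch_size = int(batch_size) is the identity on Int
  let num := PySem.Int.floordiv LEN batch_size   -- raises ZeroDivisionError for batch_size = 0: excluded by Pre_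
  let yu := PySem.Int.mod LEN batch_size
  if LEN = 0 then []
  else if LEN ≤ batch_size then [[0, LEN]]
  else
    let out := (PySem.List.pyRange 0 num 1).foldl
      (fun acc i => acc ++ [[i * batch_size, (i + 1) * batch_size]]) ([] : List (List Int))
    if yu ≠ 0 then out ++ [[num * batch_size, LEN]] else out

-- ===== PORT B =====
-- the while-loop of Source B; the 'bs ≤ 0' guard only makes the recursion total — Python B raises
-- ValueError before the loop for batch_size ≤ 0 (outside Pre_)
def pvGoB (bs : Int) (out : List (List Int)) (start remaining : Int) : List (List Int) :=
  if _h : bs ≤ 0 then out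
  else if remaining = 0 then out
  else if remaining ≤ bs then out ++ [[start, start + remaining]]
  else pvGoB bs (out ++ [[start, start + bs]]) (start + bs) (remaining - bs)
termination_by remaining.toNat
decreasing_by omega

def get_batch_index_alt (LEN : Int) (batch_size : Int) : List (List Int) :=
  pvGoB batch_size [] 0 LEN

-- ===== PRECONDITION & SPEC =====
-- Pre_ excludes batch_size ≤ 0: at batch_size = 0 both programs raise (A a ZeroDivisionError);
-- for negative batch_size A's floor division yields accidental values such as [[6, 5]] (start past
-- end) while B's input validation raises ValueError.
def Pre_get_batch_index (LEN : Int) (batch_size : Int) : Prop := 0 < batch_size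
instance (LEN : Int) (batch_size : Int) : Decidable (Pre_get_batch_index LEN batch_size) := by
  unfold Pre_get_batch_index; infer_instance
def pvWitness_get_batch_index : Int × Int := (5, 3)

def Spec_get_batch_index (LEN : Int) (batch_size : Int) (out : List (List Int)) : Prop := out = get_batch_index_alt LEN batch_size
instance (LEN : Int) (batch_size : Int) (out : List (List Int)) : Decidable (Spec_get_batch_index LEN batch_size out) := by unfold Spec_get_batch_index; infer_instance

-- ===== CLAIM (what is proved, stated in full; the proofs are below) =====
def Claim_equal_get_batch_index : Prop := ∀ (LEN : Int) (batch_size : Int), Dom_get_batch_index LEN batch_size → Pre_get_batch_index LEN batch_size → Spec_get_batch_index LEN batch_size (get_batch_index LEN batch_size)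

-- ===== LEMMAS AND PROOFS =====

-- A's loop: appending singletons is a map
theorem pv_foldl_app (g : Int → List Int) (xs : List Int) (init : List (List Int)) :
    xs.foldl (fun acc i => acc ++ [g i]) init = init ++ xs.map g := by
  induction xs generalizing init with
  | nil => simp
  | cons x xs ih => simp [ih]

-- characterisation of B's loop, in ediv/emod form (= Python // and % for a positive divisor)
theorem pvGoB_eq (bs : Int) (hb : 0 < bs) (n : Nat) :
    ∀ (LEN : Int), LEN.toNat ≤ n → 0 < LEN → ∀ (start : Int) (out : List (List Int)),
      pvGoB bs out start LEN =
        out ++ ((List.range (LEN / bs).toNat).map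
                  (fun (i : Nat) => [start + (i : Int) * bs, start + ((i : Int) + 1) * bs]) ++
                (if LEN % bs = 0 then [] else [[start + (LEN / bs) * bs, start + LEN]])) := by
  induction n with
  | zero => intro LEN hle hpos; omega
  | succ n ih =>
    intro LEN hle hpos start out
    rw [pvGoB]
    rw [dif_neg (by omega), if_neg (by omega)]
    by_cases hsmall : LEN ≤ bs
    · rw [if_pos hsmall]
      rcases eq_or_lt_of_le hsmall with heq | hlt
      · -- LEN = bs: one full batch, q = 1, r = 0
        subst heq
        have hq : LEN / LEN = 1 := Int.ediv_self (by omega)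
        simp [hq]
      · -- 0 < LEN < bs: q = 0, r = LEN ≠ 0
        have hq : LEN / bs = 0 := Int.ediv_eq_zero_of_lt (by omega) hlt
        have hr : LEN % bs = LEN := Int.emod_eq_of_lt (by omega) hlt
        simp [hq, hr, show LEN ≠ 0 by omega]
    · rw [if_neg hsmall]
      have hsmall' : bs < LEN := by omega
      have hpos' : 0 < LEN - bs := by omega
      have hrec := ih (LEN - bs) (by omega) hpos' (start + bs) (out ++ [[start, start + bs]])
      rw [hrec]
      have hq' : (LEN - bs) / bs = LEN / bs - 1 := by
        have h := Int.add_mul_ediv_right LEN (-1) (show bs ≠ 0 by omega)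
        rw [show LEN - bs = LEN + (-1) * bs by ring, h]; ring
      have hr' : (LEN - bs) % bs = LEN % bs := by
        rw [Int.emod_def, Int.emod_def, hq']; ring
      have hq1 : 1 ≤ LEN / bs := by
        have h := Int.ediv_le_ediv hb (le_of_lt hsmall')
        rwa [Int.ediv_self (by omega)] at h
      have hqn : (LEN / bs).toNat = ((LEN - bs) / bs).toNat + 1 := by omega
      have hM : (List.range (LEN / bs).toNat).map
            (fun (i : Nat) => [start + (i : Int) * bs, start + ((i : Int) + 1) * bs])
          = [[start, start + bs]] ++ (List.range ((LEN - bs) / bs).toNat).map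
            (fun (i : Nat) => [start + bs + (i : Int) * bs, start + bs + ((i : Int) + 1) * bs]) := by
        rw [hqn, List.range_succ_eq_map, List.map_cons, List.map_map]
        simp only [List.singleton_append]
        congr 1
        · simp only [List.cons.injEq, and_true]
          constructor <;> push_cast <;> ring
        · apply List.map_congr_left
          intro i _
          simp only [Function.comp_apply, List.cons.injEq, and_true]
          constructor <;> push_cast <;> ring
      have hT : (if LEN % bs = 0 then ([] : List (List Int))
                 else [[start + (LEN / bs) * bs, start + LEN]])
          = (if (LEN - bs) % bs = 0 then ([] : List (List Int))
             else [[start + bs + ((LEN - bs) / bs) * bs, start + bs + (LEN - bs)]]) := by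
        rw [hr', hq']
        split_ifs with h
        · rfl
        · simp only [List.cons.injEq, and_true]
          constructor <;> ring
      rw [hM, hT]
      simp [List.append_assoc]

-- ===== VERDICT (by name: the statement is the Claim_ definition above) =====
theorem get_batch_index_spec : Claim_equal_get_batch_index := by
  intro LEN bs _dom hb
  have hbs : 0 < bs := hb
  show get_batch_index LEN bs = get_batch_index_alt LEN bs
  unfold get_batch_index get_batch_index_alt
  by_cases h0 : LEN = 0
  · rw [pvGoB]; simp [h0, show ¬ bs ≤ 0 by omega]
  by_cases hle : LEN ≤ bs
  · -- LEN < 0 or 0 < LEN ≤ bs: the loop emits exactly [[0, LEN]] in its first iteration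
    rw [pvGoB]
    simp [h0, hle, show ¬ bs ≤ 0 by omega]
  · -- LEN > bs ≥ 1
    have hpos : 0 < LEN := by omega
    have hkey := pvGoB_eq bs hbs LEN.toNat LEN le_rfl hpos 0 []
    rw [hkey]
    simp only [PySem.Int.floordiv_eq_ediv_of_pos hbs, PySem.Int.mod_eq_emod_of_pos hbs,
      if_neg h0, if_neg hle]
    rw [pv_foldl_app, PySem.List.pyRange_one]
    simp only [List.map_map, Int.sub_zero, List.nil_append, zero_add, Function.comp_def]
    by_cases hr : LEN % bs = 0
    · simp [hr]
    · simp [hr]
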